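-- pv_equiv track=rewrite | github.com/way2arun/datastructures_algorithms | src/arrays/maxProduct.py | splitByZero
-- ===== SOURCE A (Python) =====
-- def splitByZero(nums):
--     retArr = []  # 2d array
--     row = []
--     for num in nums:
--         if num == 0:
--             if len(row) > 0:
--                 retArr.append(row)
--                 row = []
--         else:
--             row.append(num)
--     if len(row) > 0:
--         retArr.append(row)
--     return retArr
-- ===== SOURCE B (Python) =====
-- def splitByZero(nums):
--     bounds = [-1] + [i for i, x in enumerate(nums) if x == 0] + [len(nums)]
--     return [nums[a + 1:b] for a, b in zip(bounds, bounds[1:]) if b - a > 1]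
-- ===== Notes on version B (the rewrite author's own statement) =====
-- stated objective: alternative
-- what changed: Replaces A's single-pass row-accumulator state machine with an index-arithmetic approach: first collect the positions of the zeros, then cut the list into slices between consecutive boundary positions, keeping the non-empty slices.
import Mathlib
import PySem

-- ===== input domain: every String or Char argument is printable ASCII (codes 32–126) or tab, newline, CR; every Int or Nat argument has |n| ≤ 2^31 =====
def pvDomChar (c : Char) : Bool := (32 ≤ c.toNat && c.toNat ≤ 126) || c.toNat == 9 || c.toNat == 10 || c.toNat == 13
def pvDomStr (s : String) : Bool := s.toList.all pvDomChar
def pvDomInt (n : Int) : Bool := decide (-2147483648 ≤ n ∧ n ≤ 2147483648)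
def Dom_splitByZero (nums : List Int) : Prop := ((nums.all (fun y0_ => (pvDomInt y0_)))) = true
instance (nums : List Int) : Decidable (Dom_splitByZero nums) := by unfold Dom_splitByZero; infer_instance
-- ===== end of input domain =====

-- ===== PORT A =====
-- B replaces A's row-accumulator state machine by index arithmetic: collect the zero
-- positions, then cut the list into slices between consecutive boundaries (alternative; same O(n) cost).
def splitByZero (nums : List Int) : List (List Int) :=
  let s := nums.foldl
    (fun (st : List (List Int) × List Int) num =>
      if num == 0 then
        if st.2.length > 0 then (st.1 ++ [st.2], ([] : List Int)) else st
      else (st.1, st.2 ++ [num]))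
    ([], [])
  if s.2.length > 0 then s.1 ++ [s.2] else s.1

-- ===== PORT B =====
-- bounds = [-1] + [i for i, x in enumerate(nums) if x == 0] + [len(nums)]
-- return [nums[a+1:b] for a, b in zip(bounds, bounds[1:]) if b - a > 1]
def splitByZero_alt (nums : List Int) : List (List Int) :=
  let bounds : List Int :=
    [-1] ++ (PySem.List.enumerate nums 0).filterMap
      (fun p => if p.2 == 0 then some p.1 else none) ++ [(nums.length : Int)]
  (bounds.zip bounds.tail).filterMap
    (fun p => if p.2 - p.1 > 1 then some (PySem.List.slice nums (some (p.1 + 1)) (some p.2)) else none)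

-- ===== PRECONDITION & SPEC =====
def Spec_splitByZero (nums : List Int) (out : List (List Int)) : Prop := out = splitByZero_alt nums
instance (nums : List Int) (out : List (List Int)) : Decidable (Spec_splitByZero nums out) := by unfold Spec_splitByZero; infer_instance

-- ===== CLAIM (what is proved, stated in full; the proofs are below) =====
def Claim_equal_splitByZero : Prop := ∀ (nums : List Int), Dom_splitByZero nums → Spec_splitByZero nums (splitByZero nums)

-- ===== LEMMAS AND PROOFS =====

-- canonical recursive splitter: both ports are reduced to it
def splitRec : List Int → List (List Int)
  | [] => []
  | x :: xs =>
    if x == 0 then splitRec xs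
    else (x :: xs.takeWhile (fun y => !(y == 0))) :: splitRec (xs.dropWhile (fun y => !(y == 0)))
termination_by l => l.length
decreasing_by
  · simp
  · exact Nat.lt_succ_of_le (List.length_dropWhile_le _ _)

theorem splitRec_nil : splitRec [] = [] := by simp [splitRec]

theorem splitRec_cons_zero (x : Int) (xs : List Int) (hx : (x == 0) = true) :
    splitRec (x :: xs) = splitRec xs := by rw [splitRec]; simp [hx]

theorem splitRec_cons_nonzero (x : Int) (xs : List Int) (hx : (x == 0) = false) :
    splitRec (x :: xs) =
      (x :: xs.takeWhile (fun y => !(y == 0))) :: splitRec (xs.dropWhile (fun y => !(y == 0))) := by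
  rw [splitRec]; simp [hx]

-- ---------- A = splitRec ----------

-- A's loop state collapsed to the remaining input and pending row
def glue (row : List Int) : List Int → List (List Int)
  | [] => if row.length > 0 then [row] else []
  | x :: xs =>
    if x == 0 then
      if row.length > 0 then row :: glue [] xs else glue [] xs
    else glue (row ++ [x]) xs

theorem glue_foldl (xs : List Int) : ∀ (r : List (List Int)) (row : List Int),
    (let s := xs.foldl
      (fun (st : List (List Int) × List Int) num =>
        if num == 0 then
          if st.2.length > 0 then (st.1 ++ [st.2], ([] : List Int)) else st
        else (st.1, st.2 ++ [num])) (r, row)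
     if s.2.length > 0 then s.1 ++ [s.2] else s.1) = r ++ glue row xs := by
  induction xs with
  | nil =>
    intro r row
    simp only [List.foldl_nil, glue]
    split <;> simp
  | cons x xs ih =>
    intro r row
    simp only [List.foldl_cons]
    by_cases hx : (x == 0) = true
    · by_cases hr : row.length > 0
      · simp only [hx, hr, if_pos]
        rw [ih (r ++ [row]) []]
        simp [glue, hx, hr]
      · have hrow : row = [] := by
          cases row with
          | nil => rfl
          | cons a t => simp at hr
        subst hrow
        simp only [hx, if_pos, List.length_nil, gt_iff_lt, Nat.lt_irrefl, if_false]
        simpa [glue, hx] using ih r []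
    · simp only [hx, if_false, Bool.false_eq_true]
      simpa [glue, hx] using ih r (row ++ [x])

theorem glue_splitRec (xs : List Int) :
    (glue [] xs = splitRec xs) ∧
    (∀ row : List Int, row ≠ [] →
      glue row xs = (row ++ xs.takeWhile (fun y => !(y == 0))) ::
        splitRec (xs.dropWhile (fun y => !(y == 0)))) := by
  induction xs with
  | nil =>
    refine ⟨by simp [glue, splitRec_nil], ?_⟩
    intro row hrow
    simp [glue, splitRec_nil, List.length_pos_iff.mpr hrow]
  | cons x xs ih =>
    obtain ⟨ih1, ih2⟩ := ih
    by_cases hx : (x == 0) = true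
    · have hz : splitRec (x :: xs) = splitRec xs := splitRec_cons_zero x xs hx
      refine ⟨?_, ?_⟩
      · simp only [glue, hx, if_pos]
        simp [ih1, hz]
      · intro row hrow
        simp only [glue, hx, if_pos, List.length_pos_iff.mpr hrow]
        rw [ih1, List.takeWhile_cons, List.dropWhile_cons]
        simp [hx, hz]
    · have hx' : (x == 0) = false := by simp_all
      refine ⟨?_, ?_⟩
      · simp only [glue, hx', Bool.false_eq_true, if_false]
        rw [List.nil_append, ih2 [x] (by simp), splitRec_cons_nonzero x xs hx']
        simp
      · intro row hrow
        simp only [glue, hx', Bool.false_eq_true, if_false]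
        rw [ih2 (row ++ [x]) (by simp)]
        rw [List.takeWhile_cons, List.dropWhile_cons]
        simp [hx']

theorem a_eq_splitRec (xs : List Int) : splitByZero xs = splitRec xs := by
  unfold splitByZero
  rw [glue_foldl xs [] []]
  simp [(glue_splitRec xs).1]

-- ---------- B = splitRec ----------

-- zero positions, enumerated from start s
def zposF (s : Int) (xs : List Int) : List Int :=
  (PySem.List.enumerate xs s).filterMap (fun p => if p.2 == 0 then some p.1 else none)

-- slices between consecutive boundaries
def core (nums : List Int) (bs : List Int) : List (List Int) :=
  (bs.zip bs.tail).filterMap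
    (fun p => if p.2 - p.1 > 1 then some (PySem.List.slice nums (some (p.1 + 1)) (some p.2)) else none)

theorem alt_eq_core (nums : List Int) :
    splitByZero_alt nums = core nums (-1 :: (zposF 0 nums ++ [(nums.length : Int)])) := rfl

theorem zposF_succ (xs : List Int) : ∀ s : Int, zposF (s + 1) xs = (zposF s xs).map (· + 1) := by
  induction xs with
  | nil => intro s; simp [zposF, PySem.List.enumerate_nil]
  | cons x xs ih =>
    intro s
    simp only [zposF, PySem.List.enumerate_cons, List.filterMap_cons]
    by_cases hx : (x == 0) = true
    · have := ih (s + 1)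
      simp only [zposF] at this
      simp only [hx, if_pos]
      simp
      simpa using this
    · have := ih (s + 1)
      simp only [zposF] at this
      simp only [hx, Bool.false_eq_true, if_false]
      simpa using this

theorem zposF_cons (x : Int) (xs : List Int) :
    zposF 0 (x :: xs) =
      (if (x == 0) = true then [(0 : Int)] else []) ++ (zposF 0 xs).map (· + 1) := by
  simp only [zposF, PySem.List.enumerate_cons, List.filterMap_cons]
  have h := zposF_succ xs 0
  simp only [zposF, zero_add] at h ⊢
  rw [h]
  by_cases hx : (x == 0) = true <;> simp [hx]

theorem zposF_nonneg (xs : List Int) : ∀ a ∈ zposF 0 xs, 0 ≤ a := by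
  induction xs with
  | nil => simp [zposF, PySem.List.enumerate_nil]
  | cons x xs ih =>
    intro a ha
    rw [zposF_cons] at ha
    rcases List.mem_append.mp ha with h | h
    · split at h <;> simp_all
    · obtain ⟨b, hb, rfl⟩ := List.mem_map.mp h
      have := ih b hb
      omega

-- the head of (zero positions ++ [length]) is the length of the leading nonzero run
theorem head_bounds (xs : List Int) :
    ∃ r : List Int, zposF 0 xs ++ [(xs.length : Int)] =
      (((xs.takeWhile (fun y => !(y == 0))).length : Int)) :: r := by
  induction xs with
  | nil => exact ⟨[], by simp [zposF, PySem.List.enumerate_nil]⟩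
  | cons x xs ih =>
    obtain ⟨r, hr⟩ := ih
    by_cases hx : (x == 0) = true
    · refine ⟨(zposF 0 xs).map (· + 1) ++ [(xs.length : Int) + 1], ?_⟩
      rw [zposF_cons]
      simp [hx, List.takeWhile_cons]
    · refine ⟨r.map (· + 1), ?_⟩
      rw [zposF_cons]
      simp only [hx, Bool.false_eq_true, if_false, List.nil_append, List.takeWhile_cons,
        Bool.not_eq_eq_eq_not, Bool.not_true]
      have hm : (zposF 0 xs).map (· + 1) ++ [((x :: xs).length : Int)] =
          ((zposF 0 xs) ++ [(xs.length : Int)]).map (· + 1) := by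
        simp [List.map_append]
      rw [hm, hr]
      simp [hx]

theorem slice_cons_shift (x : Int) (xs : List Int) (a b : Int) (ha : 0 ≤ a) (hb : 0 ≤ b) :
    PySem.List.slice (x :: xs) (some (a + 1)) (some (b + 1)) =
      PySem.List.slice xs (some a) (some b) := by
  rw [PySem.List.slice_toNat (x :: xs) (a := a + 1) (b := b + 1) (by omega) (by omega),
    PySem.List.slice_toNat xs (a := a) (b := b) ha hb]
  have h1 : (a + 1).toNat = a.toNat + 1 := by omega
  have h2 : (b + 1).toNat = b.toNat + 1 := by omega
  rw [h1, h2, List.drop_succ_cons]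
  congr 1
  omega

theorem slice_zero_take (xs : List Int) (b : Int) (hb : 0 ≤ b) :
    PySem.List.slice xs (some 0) (some b) = xs.take b.toNat := by
  rw [PySem.List.slice_toNat xs (a := 0) (b := b) le_rfl hb]
  simp

theorem core_pair (nums : List Int) (a b : Int) (r : List Int) :
    core nums (a :: b :: r) =
      (if b - a > 1 then [PySem.List.slice nums (some (a + 1)) (some b)] else []) ++
        core nums (b :: r) := by
  simp only [core, List.tail_cons, List.zip_cons_cons, List.filterMap_cons]
  by_cases h : b - a > 1
  · simp [h]
  · simp [h]

theorem core_single (nums : List Int) (a : Int) : core nums [a] = [] := rfl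

theorem core_shift (x : Int) (xs : List Int) (bs : List Int) (h : ∀ a ∈ bs, 0 ≤ a) :
    core (x :: xs) (bs.map (· + 1)) = core xs bs := by
  unfold core
  have ht : (bs.map (· + 1)).tail = bs.tail.map (· + 1) := by
    cases bs <;> simp
  rw [ht, List.zip_map, List.filterMap_map]
  apply List.filterMap_congr
  intro p hp
  obtain ⟨h1, h2⟩ := List.of_mem_zip (a := p.1) (b := p.2) (by simpa using hp)
  have hp1 : 0 ≤ p.1 := h _ h1
  have hp2 : 0 ≤ p.2 := h _ (List.mem_of_mem_tail h2)
  simp only [Function.comp, Prod.map]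
  have hc : p.2 + 1 - (p.1 + 1) = p.2 - p.1 := by ring
  rw [hc]
  split
  · rw [show p.1 + 1 + 1 = (p.1 + 1) + 1 by ring, slice_cons_shift x xs (p.1 + 1) p.2 (by omega) hp2]
  · rfl

theorem take_takeWhile_length (p : Int → Bool) (xs : List Int) :
    xs.take (xs.takeWhile p).length = xs.takeWhile p := by
  induction xs with
  | nil => simp
  | cons x xs ih =>
    rw [List.takeWhile_cons]
    split <;> simp [ih]

-- glue the optional leading run onto the recursive split of the rest
theorem lead_run (ys : List Int) :
    (if 0 < (ys.takeWhile (fun y => !(y == 0))).length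
      then [ys.takeWhile (fun y => !(y == 0))] else []) ++
      splitRec (ys.dropWhile (fun y => !(y == 0))) = splitRec ys := by
  cases ys with
  | nil => simp [splitRec_nil]
  | cons z zs =>
    by_cases hz : (z == 0) = true
    · simp [List.takeWhile_cons, List.dropWhile_cons, hz]
    · have hz' : (z == 0) = false := by simp_all
      rw [splitRec_cons_nonzero z zs hz']
      simp [List.takeWhile_cons, List.dropWhile_cons, hz']

theorem core_main (xs : List Int) :
    core xs (zposF 0 xs ++ [(xs.length : Int)]) =
      splitRec (xs.dropWhile (fun y => !(y == 0))) := by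
  induction xs with
  | nil => simp [zposF, PySem.List.enumerate_nil, core_single, splitRec_nil]
  | cons x ys ih =>
    have hmap : (zposF 0 ys).map (· + 1) ++ [((x :: ys).length : Int)] =
        ((zposF 0 ys) ++ [(ys.length : Int)]).map (· + 1) := by
      simp [List.map_append]
    obtain ⟨r', hr'⟩ := head_bounds ys
    have hnn : ∀ a ∈ zposF 0 ys ++ [(ys.length : Int)], 0 ≤ a := by
      intro a ha
      rcases List.mem_append.mp ha with h | h
      · exact zposF_nonneg ys a h
      · simp at h; omega
    by_cases hx : (x == 0) = true
    · -- boundary: the list starts with a zero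
      rw [zposF_cons]
      simp only [hx, if_pos, List.cons_append, List.singleton_append, List.nil_append]
      rw [hmap, hr', List.map_cons, core_pair]
      have hshift : core (x :: ys) ((((ys.takeWhile (fun y => !(y == 0))).length : Int) + 1) :: r'.map (· + 1)) =
          core ys (((ys.takeWhile (fun y => !(y == 0))).length : Int) :: r') := by
        have := core_shift x ys ((((ys.takeWhile (fun y => !(y == 0))).length : Int)) :: r')
          (by rw [← hr']; exact hnn)
        simpa using this
      rw [hshift, ← hr', ih]
      have hdz : (x :: ys).dropWhile (fun y => !(y == 0)) = x :: ys := by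
        simp [List.dropWhile_cons, hx]
      rw [hdz, splitRec_cons_zero x ys hx]
      set k := (ys.takeWhile (fun y => !(y == 0))).length with hk
      have hslice : PySem.List.slice (x :: ys) (some (0 + 1)) (some ((k : Int) + 1)) =
          ys.takeWhile (fun y => !(y == 0)) := by
        rw [slice_cons_shift x ys 0 (k : Int) le_rfl (by positivity),
          slice_zero_take ys (k : Int) (by positivity)]
        simp [hk, take_takeWhile_length]
      rw [hslice]
      by_cases h : 0 < k
      · rw [if_pos (show (k : Int) + 1 - 0 > 1 by omega)]
        have hl := lead_run ys
        rw [if_pos (show 0 < (ys.takeWhile (fun y => !(y == 0))).length from h)] at hl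
        simpa using hl
      · rw [if_neg (show ¬ ((k : Int) + 1 - 0 > 1) by omega)]
        have hl := lead_run ys
        rw [if_neg (show ¬ 0 < (ys.takeWhile (fun y => !(y == 0))).length from h)] at hl
        simpa using hl
    · -- the list starts with a nonzero element: all boundaries shift by one
      have hx' : (x == 0) = false := by simp_all
      rw [zposF_cons]
      simp only [hx', Bool.false_eq_true, if_false, List.nil_append]
      rw [hmap, core_shift x ys _ hnn, ih]
      simp [List.dropWhile_cons, hx']

theorem b_eq_splitRec (xs : List Int) : splitByZero_alt xs = splitRec xs := by
  rw [alt_eq_core]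
  obtain ⟨r, hr⟩ := head_bounds xs
  rw [hr, core_pair, ← hr, core_main]
  set k := (xs.takeWhile (fun y => !(y == 0))).length with hk
  have hslice : PySem.List.slice xs (some (-1 + 1)) (some (k : Int)) =
      xs.takeWhile (fun y => !(y == 0)) := by
    rw [show ((-1 : Int) + 1) = 0 by ring, slice_zero_take xs (k : Int) (by positivity)]
    simp [hk, take_takeWhile_length]
  rw [hslice]
  by_cases h : 0 < k
  · rw [if_pos (show (k : Int) - (-1) > 1 by omega)]
    have hl := lead_run xs
    rw [if_pos (show 0 < (xs.takeWhile (fun y => !(y == 0))).length from h)] at hl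
    simpa using hl
  · rw [if_neg (show ¬ ((k : Int) - (-1) > 1) by omega)]
    have hl := lead_run xs
    rw [if_neg (show ¬ 0 < (xs.takeWhile (fun y => !(y == 0))).length from h)] at hl
    simpa using hl

-- ===== VERDICT (by name: the statement is the Claim_ definition above) =====
theorem splitByZero_spec : Claim_equal_splitByZero := by
  intro nums _
  unfold Spec_splitByZero
  rw [a_eq_splitRec, b_eq_splitRec]
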